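-- pv_equiv track=rewrite | github.com/maninka123/tennis-tour-dashboard | scripts/atp_tournaments_to_json.py | _winner_from_sets
-- ===== SOURCE A (Python) =====
-- from typing import Any, Dict, List, Optional, Tuple
--
-- def _winner_from_sets(sets: List[Dict[str, Any]]) -> Optional[int]:
--     p1_wins = sum(1 for s in sets if int(s.get("p1", 0)) > int(s.get("p2", 0)))
--     p2_wins = sum(1 for s in sets if int(s.get("p2", 0)) > int(s.get("p1", 0)))
--     if p1_wins > p2_wins:
--         return 1
--     if p2_wins > p1_wins:
--         return 2
--     return None
-- ===== SOURCE B (Python) =====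
-- from typing import Any, Dict, List, Optional
--
-- def _winner_from_sets(sets: List[Dict[str, Any]]) -> Optional[int]:
--     # Cancellation stack: tokens of the currently-leading player; an opposite
--     # token cancels the top instead of being pushed (Boyer-Moore style).
--     stack: List[int] = []
--     for s in sets:
--         p1 = int(s.get("p1", 0))
--         p2 = int(s.get("p2", 0))
--         if p1 > p2:
--             t = 1
--         elif p2 > p1:
--             t = 2
--         else:
--             continue
--         if stack and stack[-1] != t:
--             stack.pop()
--         else:
--             stack.append(t)
--     return stack[-1] if stack else None
-- ===== Notes on version B (the rewrite author's own statement) =====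
-- stated objective: alternative
-- what changed: Replaces A's two counting comprehensions and count comparison with a Boyer-Moore-style cancellation stack: each set's winner token is pushed unless it cancels an opposite token on top, and the surviving top (or None) is the winner.
import Mathlib
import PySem

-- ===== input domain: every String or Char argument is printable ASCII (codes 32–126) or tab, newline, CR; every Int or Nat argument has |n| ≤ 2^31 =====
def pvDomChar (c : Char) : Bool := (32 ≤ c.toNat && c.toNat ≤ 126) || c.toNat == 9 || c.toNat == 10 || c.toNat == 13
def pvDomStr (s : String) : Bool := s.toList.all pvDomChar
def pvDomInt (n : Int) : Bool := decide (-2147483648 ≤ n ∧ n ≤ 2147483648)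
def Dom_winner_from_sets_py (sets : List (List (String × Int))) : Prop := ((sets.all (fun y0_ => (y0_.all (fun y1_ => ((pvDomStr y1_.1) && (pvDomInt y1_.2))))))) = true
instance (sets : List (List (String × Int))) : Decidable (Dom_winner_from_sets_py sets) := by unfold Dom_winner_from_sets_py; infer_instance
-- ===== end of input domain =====

-- B replaces A's two counting passes by a Boyer–Moore-style cancellation stack; same O(n), an alternative algorithm.

-- shared helper: port of s.get(k, d) on an association list (first match)
def pvGetD (s : List (String × Int)) (k : String) (d : Int) : Int :=
  match s.find? (fun p => p.1 == k) with
  | some p => p.2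
  | none => d

-- ===== PORT A =====
def winner_from_sets_py (sets : List (List (String × Int))) : Option Int :=
  let p1_wins : Int := (sets.map (fun s => if pvGetD s "p1" 0 > pvGetD s "p2" 0 then (1 : Int) else 0)).sum
  let p2_wins : Int := (sets.map (fun s => if pvGetD s "p2" 0 > pvGetD s "p1" 0 then (1 : Int) else 0)).sum
  if p1_wins > p2_wins then some 1
  else if p2_wins > p1_wins then some 2
  else none

-- ===== PORT B =====
-- stack represented head-as-top: push = cons, pop = tail, stack[-1] = head?
def pvPush (st : List Int) (t : Int) : List Int :=
  match st with
  | h :: rest => if h ≠ t then rest else t :: h :: rest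
  | [] => [t]

def pvStep (st : List Int) (s : List (String × Int)) : List Int :=
  let p1 := pvGetD s "p1" 0
  let p2 := pvGetD s "p2" 0
  if p1 > p2 then pvPush st 1
  else if p2 > p1 then pvPush st 2
  else st

def winner_from_sets_py_alt (sets : List (List (String × Int))) : Option Int :=
  (sets.foldl pvStep []).head?

-- ===== PRECONDITION & SPEC =====
def Spec_winner_from_sets_py (sets : List (List (String × Int))) (out : Option Int) : Prop := out = winner_from_sets_py_alt sets
instance (sets : List (List (String × Int))) (out : Option Int) : Decidable (Spec_winner_from_sets_py sets out) := by unfold Spec_winner_from_sets_py; infer_instance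

-- ===== CLAIM (what is proved, stated in full; the proofs are below) =====
def Claim_equal_winner_from_sets_py : Prop := ∀ (sets : List (List (String × Int))), Dom_winner_from_sets_py sets → Spec_winner_from_sets_py sets (winner_from_sets_py sets)

-- ===== LEMMAS AND PROOFS =====

-- abstract stack state: the signed margin d encodes a stack of |d| equal tokens
def pvEncode (d : Int) : List Int :=
  if 0 ≤ d then List.replicate d.toNat 1 else List.replicate (-d).toNat 2

theorem pvPush_encode_one (d : Int) : pvPush (pvEncode d) 1 = pvEncode (d + 1) := by
  unfold pvEncode pvPush
  split_ifs with h1 h2 h2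
  · -- 0 ≤ d, 0 ≤ d+1 : push onto stack of 1s
    have hn : (d + 1).toNat = d.toNat + 1 := by omega
    rw [hn]
    cases hd : d.toNat with
    | zero => simp
    | succ m => simp [List.replicate_succ]
  · omega
  · -- d < 0, 0 ≤ d+1 : d = -1
    have : d = -1 := by omega
    subst this; rfl
  · -- d < 0, d+1 < 0 : pop a 2
    have hn : (-d).toNat = (-(d + 1)).toNat + 1 := by omega
    rw [hn]; simp [List.replicate_succ]

theorem pvPush_encode_two (d : Int) : pvPush (pvEncode d) 2 = pvEncode (d - 1) := by
  unfold pvEncode pvPush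
  split_ifs with h1 h2 h2
  · -- 0 ≤ d, 0 ≤ d-1 : d > 0, pop a 1
    have hn : d.toNat = (d - 1).toNat + 1 := by omega
    rw [hn]; simp [List.replicate_succ]
  · -- 0 ≤ d, d-1 < 0 : d = 0
    have : d = 0 := by omega
    subst this; rfl
  · omega
  · -- d < 0 : push onto stack of 2s
    have hn : (-(d - 1)).toNat = (-d).toNat + 1 := by omega
    rw [hn]
    cases hd : (-d).toNat with
    | zero => omega
    | succ m => simp [List.replicate_succ]

-- the stack built by B's fold is the encoding of the signed margin of A's two counts
theorem pv_fold_encode (sets : List (List (String × Int))) (d0 : Int) :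
    sets.foldl pvStep (pvEncode d0)
    = pvEncode (d0 + (sets.map (fun s => if pvGetD s "p1" 0 > pvGetD s "p2" 0 then (1 : Int) else 0)).sum
                   - (sets.map (fun s => if pvGetD s "p2" 0 > pvGetD s "p1" 0 then (1 : Int) else 0)).sum) := by
  induction sets generalizing d0 with
  | nil => simp
  | cons s rest ih =>
    simp only [List.foldl_cons, List.map_cons, List.sum_cons]
    by_cases h1 : pvGetD s "p1" 0 > pvGetD s "p2" 0
    · rw [show pvStep (pvEncode d0) s = pvEncode (d0 + 1) by
        simp [pvStep, h1, pvPush_encode_one]]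
      rw [ih]
      congr 1
      simp [h1]
      omega
    · by_cases h2 : pvGetD s "p2" 0 > pvGetD s "p1" 0
      · rw [show pvStep (pvEncode d0) s = pvEncode (d0 - 1) by
          simp [pvStep, h1, h2, pvPush_encode_two]]
        rw [ih]
        congr 1
        simp [h1, h2]
        omega
      · rw [show pvStep (pvEncode d0) s = pvEncode d0 by simp [pvStep, h1, h2]]
        rw [ih]
        congr 1
        simp [h1, h2]

theorem pvEncode_head (d : Int) :
    (pvEncode d).head? = if d > 0 then some 1 else if d < 0 then some 2 else none := by
  unfold pvEncode
  rcases lt_trichotomy d 0 with h | h | h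
  · rw [if_neg (by omega)]
    have hn : (-d).toNat = ((-d).toNat - 1) + 1 := by omega
    rw [hn, List.replicate_succ]
    simp [show ¬ d > 0 by omega, h]
  · subst h; rfl
  · rw [if_pos (by omega)]
    have hn : d.toNat = (d.toNat - 1) + 1 := by omega
    rw [hn, List.replicate_succ]
    simp [h]

-- ===== VERDICT (by name: the statement is the Claim_ definition above) =====
theorem winner_from_sets_py_spec : Claim_equal_winner_from_sets_py := by
  intro sets _
  unfold Spec_winner_from_sets_py winner_from_sets_py winner_from_sets_py_alt
  have h0 : ([] : List Int) = pvEncode 0 := by rfl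
  rw [h0, pv_fold_encode, pvEncode_head]
  dsimp only
  split_ifs <;> first | rfl | omega
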